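-- pv_equiv track=rewrite | github.com/abbel97/-A2SV_Solved_Questions | DominantCharacter.py | smallest_dominant_substring
-- ===== SOURCE A (Python) =====
-- def smallest_dominant_substring(s):
--     n = len(s)
--     min_length = float('inf')
--
--     for i in range(n):
--         count_a = count_b = count_c = 0
--         for j in range(i, n):
--             if s[j] == 'a':
--                 count_a += 1
--             elif s[j] == 'b':
--                 count_b += 1
--             elif s[j] == 'c':
--                 count_c += 1
--
--             if j - i + 1 >= 2 and count_a > count_b and count_a > count_c:
--                 min_length = min(min_length, j - i + 1)
--                 break
--
--     return min_length if min_length != float('inf') else -1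
-- ===== SOURCE B (Python) =====
-- def smallest_dominant_substring(s):
--     # Search by window length (shortest first) over precomputed prefix
--     # difference arrays; return the first length with a dominant window.
--     n = len(s)
--     da = [0] * (n + 1)  # prefix count('a') - count('b')
--     dc = [0] * (n + 1)  # prefix count('a') - count('c')
--     for k, ch in enumerate(s):
--         da[k + 1] = da[k] + (ch == 'a') - (ch == 'b')
--         dc[k + 1] = dc[k] + (ch == 'a') - (ch == 'c')
--     for length in range(2, n + 1):
--         for i in range(n - length + 1):
--             j = i + length
--             if da[j] > da[i] and dc[j] > dc[i]:
--                 return length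
--     return -1
-- ===== Notes on version B (the rewrite author's own statement) =====
-- stated objective: alternative
-- what changed: B precomputes prefix difference arrays (count 'a' minus count 'b' / minus count 'c') once and then searches windows by increasing LENGTH, returning the first length that has a dominant window, instead of A's per-start scan with running counters and a per-start break-on-first-hit.
import Mathlib
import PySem

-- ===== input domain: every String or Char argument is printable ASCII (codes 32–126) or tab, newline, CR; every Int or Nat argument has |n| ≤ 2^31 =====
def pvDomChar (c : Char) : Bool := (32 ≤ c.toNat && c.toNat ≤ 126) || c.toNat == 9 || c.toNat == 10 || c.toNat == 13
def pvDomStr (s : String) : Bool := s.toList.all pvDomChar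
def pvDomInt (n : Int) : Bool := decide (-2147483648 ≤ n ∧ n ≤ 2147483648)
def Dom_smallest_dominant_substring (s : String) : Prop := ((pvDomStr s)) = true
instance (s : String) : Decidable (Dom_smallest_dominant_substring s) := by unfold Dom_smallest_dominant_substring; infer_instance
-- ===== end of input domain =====

-- B replaces A's per-start scan with running counters by prefix-difference arrays
-- built once plus a shortest-length-first search; objective: alternative algorithm.

-- ===== PORT A =====
-- inner loop of A from start i: running counters, first (smallest) dominant length, break
def pvInnerA : List Char → Nat → Nat → Nat → Nat → Option Nat
  | [], _, _, _, _ => none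
  | ch :: rest, len, ca, cb, cc =>
    let ca' := if ch = 'a' then ca + 1 else ca
    let cb' := if ch = 'b' then cb + 1 else cb
    let cc' := if ch = 'c' then cc + 1 else cc
    if 2 ≤ len + 1 ∧ cb' < ca' ∧ cc' < ca' then some (len + 1)
    else pvInnerA rest (len + 1) ca' cb' cc'

-- min_length update: float('inf') modelled as none
def pvOMin (acc hit : Option Nat) : Option Nat :=
  match hit with
  | none => acc
  | some h =>
    match acc with
    | none => some h
    | some b => some (min b h)

def smallest_dominant_substring (s : String) : Int :=
  let l := s.toList
  let n := l.length
  match (List.range n).foldl (fun acc i => pvOMin acc (pvInnerA (l.drop i) 0 0 0 0)) none with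
  | some v => (v : Int)
  | none => -1

-- ===== PORT B =====
-- da[k] = count 'a' - count 'b' of the length-k prefix; dc likewise with 'c'
def pvDa (l : List Char) : List Int :=
  List.scanl (fun d ch => d + (if ch = 'a' then 1 else 0) - (if ch = 'b' then 1 else 0)) 0 l

def pvDc (l : List Char) : List Int :=
  List.scanl (fun d ch => d + (if ch = 'a' then 1 else 0) - (if ch = 'c' then 1 else 0)) 0 l

-- inner loop of B: is some window of this length dominant?
def pvScanB (da dc : List Int) (n len : Nat) : Bool :=
  (List.range (n + 1 - len)).any
    (fun i => decide (da.getD i 0 < da.getD (i + len) 0) && decide (dc.getD i 0 < dc.getD (i + len) 0))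

def smallest_dominant_substring_alt (s : String) : Int :=
  let l := s.toList
  let n := l.length
  let da := pvDa l
  let dc := pvDc l
  match (List.range' 2 (n - 1)).find? (fun len => pvScanB da dc n len) with
  | some len => (len : Int)
  | none => -1

-- ===== PRECONDITION & SPEC =====
def Spec_smallest_dominant_substring (s : String) (out : Int) : Prop := out = smallest_dominant_substring_alt s
instance (s : String) (out : Int) : Decidable (Spec_smallest_dominant_substring s out) := by unfold Spec_smallest_dominant_substring; infer_instance

-- ===== CLAIM (what is proved, stated in full; the proofs are below) =====
def Claim_equal_smallest_dominant_substring : Prop := ∀ (s : String), Dom_smallest_dominant_substring s → Spec_smallest_dominant_substring s (smallest_dominant_substring s)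

-- ===== LEMMAS AND PROOFS =====

def pvCnt (c : Char) (l : List Char) (i len : Nat) : Nat := ((l.drop i).take len).count c

lemma pvCnt_succ (c : Char) (l : List Char) (i k : Nat) (ch : Char) (rest : List Char)
    (h : (l.drop i).drop k = ch :: rest) :
    pvCnt c l i (k + 1) = pvCnt c l i k + (if ch = c then 1 else 0) := by
  have hg : (l.drop i)[k]? = some ch := by
    have : ((l.drop i).drop k)[0]? = some ch := by rw [h]; rfl
    simpa using this
  unfold pvCnt
  rw [List.take_add_one, hg]
  simp [List.count_append, List.count_singleton]

def pvPW (l : List Char) (i len : Nat) : Prop :=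
  2 ≤ len ∧ pvCnt 'b' l i len < pvCnt 'a' l i len ∧ pvCnt 'c' l i len < pvCnt 'a' l i len

lemma pvInnerA_spec (l : List Char) (i : Nat) : ∀ (r : List Char) (k : Nat),
    r = (l.drop i).drop k →
    (∀ v, pvInnerA r k (pvCnt 'a' l i k) (pvCnt 'b' l i k) (pvCnt 'c' l i k) = some v →
        k < v ∧ i + v ≤ l.length ∧ pvPW l i v ∧ ∀ u, k < u → u < v → ¬ pvPW l i u)
  ∧ (pvInnerA r k (pvCnt 'a' l i k) (pvCnt 'b' l i k) (pvCnt 'c' l i k) = none →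
        ∀ u, k < u → i + u ≤ l.length → ¬ pvPW l i u) := by
  intro r
  induction r with
  | nil =>
    intro k hk
    have hlen : l.length ≤ i + k := by
      have := congrArg List.length hk
      simp [List.length_drop] at this
      omega
    constructor
    · intro v hv; simp [pvInnerA] at hv
    · intro _ u hu hul; omega
  | cons ch rest ih =>
    intro k hk
    have hrest : rest = (l.drop i).drop (k + 1) := by
      have : ((l.drop i).drop k).drop 1 = (ch :: rest).drop 1 := by rw [hk]
      simpa [List.drop_drop] using this.symm
    have hbound : i + (k + 1) ≤ l.length := by
      have := congrArg List.length hk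
      simp [List.length_drop] at this
      omega
    have ha := pvCnt_succ 'a' l i k ch rest hk.symm
    have hb := pvCnt_succ 'b' l i k ch rest hk.symm
    have hc := pvCnt_succ 'c' l i k ch rest hk.symm
    have ha' : (if ch = 'a' then pvCnt 'a' l i k + 1 else pvCnt 'a' l i k) = pvCnt 'a' l i (k+1) := by
      rw [ha]; split <;> simp_all
    have hb' : (if ch = 'b' then pvCnt 'b' l i k + 1 else pvCnt 'b' l i k) = pvCnt 'b' l i (k+1) := by
      rw [hb]; split <;> simp_all
    have hc' : (if ch = 'c' then pvCnt 'c' l i k + 1 else pvCnt 'c' l i k) = pvCnt 'c' l i (k+1) := by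
      rw [hc]; split <;> simp_all
    have hstep : pvInnerA (ch :: rest) k (pvCnt 'a' l i k) (pvCnt 'b' l i k) (pvCnt 'c' l i k)
        = if 2 ≤ k + 1 ∧ pvCnt 'b' l i (k+1) < pvCnt 'a' l i (k+1) ∧ pvCnt 'c' l i (k+1) < pvCnt 'a' l i (k+1)
          then some (k + 1)
          else pvInnerA rest (k + 1) (pvCnt 'a' l i (k+1)) (pvCnt 'b' l i (k+1)) (pvCnt 'c' l i (k+1)) := by
      rw [pvInnerA]
      simp only [ha', hb', hc']
    by_cases hcond : pvPW l i (k + 1)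
    · have hc2 : (2 ≤ k + 1 ∧ pvCnt 'b' l i (k+1) < pvCnt 'a' l i (k+1) ∧ pvCnt 'c' l i (k+1) < pvCnt 'a' l i (k+1)) := hcond
      rw [hstep, if_pos hc2]
      constructor
      · intro v hv
        cases hv
        exact ⟨by omega, hbound, hcond, by omega⟩
      · intro hv; cases hv
    · have hc2 : ¬ (2 ≤ k + 1 ∧ pvCnt 'b' l i (k+1) < pvCnt 'a' l i (k+1) ∧ pvCnt 'c' l i (k+1) < pvCnt 'a' l i (k+1)) := hcond
      rw [hstep, if_neg hc2]
      obtain ⟨ih1, ih2⟩ := ih (k + 1) hrest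
      constructor
      · intro v hv
        obtain ⟨h1, h2, h3, h4⟩ := ih1 v hv
        refine ⟨by omega, h2, h3, ?_⟩
        intro u hu huv
        rcases Nat.eq_or_lt_of_le hu with heq | hlt
        · intro hP; subst heq; exact hcond hP
        · exact h4 u hlt huv
      · intro hv u hu hul
        rcases Nat.eq_or_lt_of_le hu with heq | hlt
        · intro hP; subst heq; exact hcond hP
        · exact ih2 hv u hlt hul

lemma pvFold_spec (g : Nat → Option Nat) : ∀ (is : List Nat) (acc : Option Nat),
    (∀ v, is.foldl (fun a i => pvOMin a (g i)) acc = some v →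
       (acc = some v ∨ ∃ i ∈ is, g i = some v) ∧ (∀ w, acc = some w → v ≤ w) ∧
       (∀ i ∈ is, ∀ w, g i = some w → v ≤ w))
  ∧ (is.foldl (fun a i => pvOMin a (g i)) acc = none → acc = none ∧ ∀ i ∈ is, g i = none) := by
  intro is
  induction is with
  | nil =>
    intro acc
    refine ⟨?_, ?_⟩
    · intro v hv; simp at hv; exact ⟨Or.inl hv, fun w hw => by simp [hv] at hw; omega, by simp⟩
    · intro hv; simp at hv; exact ⟨hv, by simp⟩
  | cons j rest ih =>
    intro acc
    obtain ⟨ih1, ih2⟩ := ih (pvOMin acc (g j))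
    constructor
    · intro v hv
      simp only [List.foldl_cons] at hv
      obtain ⟨hA, hB, hC⟩ := ih1 v hv
      cases hgj : g j with
      | none =>
        have hM : pvOMin acc (g j) = acc := by simp [pvOMin, hgj]
        rw [hM] at hA hB
        refine ⟨?_, hB, ?_⟩
        · rcases hA with h | ⟨i, hi, hgi⟩
          · exact Or.inl h
          · exact Or.inr ⟨i, List.mem_cons_of_mem _ hi, hgi⟩
        · intro i hi w hw
          rcases List.mem_cons.mp hi with rfl | hi'
          · rw [hgj] at hw; cases hw
          · exact hC i hi' w hw
      | some h =>
        cases hacc : acc with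
        | none =>
          have hM : pvOMin acc (g j) = some h := by simp [pvOMin, hgj, hacc]
          rw [hM] at hA hB
          have hvh : v ≤ h := hB h rfl
          refine ⟨?_, by simp, ?_⟩
          · rcases hA with h' | ⟨i, hi, hgi⟩
            · exact Or.inr ⟨j, List.mem_cons_self .., by rw [hgj, h']⟩
            · exact Or.inr ⟨i, List.mem_cons_of_mem _ hi, hgi⟩
          · intro i hi w hw
            rcases List.mem_cons.mp hi with rfl | hi'
            · rw [hgj] at hw; cases hw; exact hvh
            · exact hC i hi' w hw
        | some b =>
          have hM : pvOMin acc (g j) = some (min b h) := by simp [pvOMin, hgj, hacc]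
          rw [hM] at hA hB
          have hvm : v ≤ min b h := hB _ rfl
          refine ⟨?_, ?_, ?_⟩
          · rcases hA with h' | ⟨i, hi, hgi⟩
            · injection h' with h''
              rcases Nat.le_total b h with hbh | hhb
              · left; rw [← h'', Nat.min_eq_left hbh]
              · right; exact ⟨j, List.mem_cons_self .., by rw [hgj, ← h'', Nat.min_eq_right hhb]⟩
            · exact Or.inr ⟨i, List.mem_cons_of_mem _ hi, hgi⟩
          · intro w hw; injection hw with hw; subst hw; omega
          · intro i hi w hw
            rcases List.mem_cons.mp hi with rfl | hi'
            · rw [hgj] at hw; injection hw with hw; subst hw; omega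
            · exact hC i hi' w hw
    · intro hv
      simp only [List.foldl_cons] at hv
      obtain ⟨hM, hrest⟩ := ih2 hv
      cases hgj : g j with
      | none =>
        simp [pvOMin, hgj] at hM
        exact ⟨hM, fun i hi => by
          rcases List.mem_cons.mp hi with rfl | hi'
          · exact hgj
          · exact hrest i hi'⟩
      | some h =>
        exfalso
        cases hacc : acc <;> simp [pvOMin, hgj, hacc] at hM

lemma pvScanl_diff (p q : Char) (l : List Char) : ∀ (i : Nat), i ≤ l.length → ∀ (a : Int),
    (List.scanl (fun d ch => d + (if ch = p then 1 else 0) - (if ch = q then 1 else 0)) a l).getD i 0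
      = a + ((l.take i).count p : Int) - ((l.take i).count q : Int) := by
  induction l with
  | nil =>
    intro i hi a
    have h0 : i = 0 := by simpa using hi
    subst h0; simp [List.scanl]
  | cons x xs ih =>
    intro i hi a
    cases i with
    | zero => simp [List.scanl]
    | succ n =>
      have hn : n ≤ xs.length := by simpa using hi
      have hrec := ih n hn (a + (if x = p then 1 else 0) - (if x = q then 1 else 0))
      simp only [List.scanl_cons, List.getD_cons_succ]
      rw [hrec]
      simp only [List.take_succ_cons, List.count_cons]
      by_cases hxp : x = p <;> by_cases hxq : x = q <;>
        simp [hxp, hxq] <;> omega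

lemma pvCond_iff (p q : Char) (l : List Char) (i len : Nat) (h : i + len ≤ l.length) (a : Int) :
    ((List.scanl (fun d ch => d + (if ch = p then 1 else 0) - (if ch = q then 1 else 0)) a l).getD i 0
      < (List.scanl (fun d ch => d + (if ch = p then 1 else 0) - (if ch = q then 1 else 0)) a l).getD (i + len) 0)
      ↔ pvCnt q l i len < pvCnt p l i len := by
  rw [pvScanl_diff p q l i (by omega) a, pvScanl_diff p q l (i + len) h a]
  have hsplit : l.take (i + len) = l.take i ++ (l.drop i).take len := List.take_add ..
  rw [hsplit, List.count_append, List.count_append]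
  unfold pvCnt
  push_cast
  omega

lemma pvFind?_range'_some (p : Nat → Bool) : ∀ (c a v : Nat), (List.range' a c).find? p = some v →
    p v = true ∧ a ≤ v ∧ v < a + c ∧ ∀ u, a ≤ u → u < v → p u = false := by
  intro c
  induction c with
  | zero => intro a v hv; simp at hv
  | succ m ih =>
    intro a v hv
    rw [List.range'_succ] at hv
    by_cases hpa : p a = true
    · rw [List.find?_cons_of_pos hpa] at hv
      cases hv
      exact ⟨hpa, Nat.le_refl _, by omega, by omega⟩
    · rw [List.find?_cons_of_neg hpa] at hv
      obtain ⟨h1, h2, h3, h4⟩ := ih (a + 1) v hv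
      refine ⟨h1, by omega, by omega, ?_⟩
      intro u hu huv
      rcases Nat.eq_or_lt_of_le hu with rfl | hlt
      · simpa using hpa
      · exact h4 u hlt huv

lemma pvFind?_range'_none (p : Nat → Bool) : ∀ (c a : Nat), (List.range' a c).find? p = none →
    ∀ u, a ≤ u → u < a + c → p u = false := by
  intro c a hn u hu huc
  have := List.find?_eq_none.mp hn u (by rw [List.mem_range']; exact ⟨u - a, by omega, by omega⟩)
  simpa using this

lemma pvScanB_iff (l : List Char) (len : Nat) :
    pvScanB (pvDa l) (pvDc l) l.length len = true ↔
      ∃ i, i + len ≤ l.length ∧ pvCnt 'b' l i len < pvCnt 'a' l i len ∧ pvCnt 'c' l i len < pvCnt 'a' l i len := by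
  unfold pvScanB
  rw [List.any_eq_true]
  constructor
  · rintro ⟨i, hi, hcond⟩
    rw [List.mem_range] at hi
    have hil : i + len ≤ l.length := by omega
    rw [Bool.and_eq_true, decide_eq_true_eq, decide_eq_true_eq] at hcond
    exact ⟨i, hil, (pvCond_iff 'a' 'b' l i len hil 0).mp hcond.1, (pvCond_iff 'a' 'c' l i len hil 0).mp hcond.2⟩
  · rintro ⟨i, hil, hb, hc⟩
    refine ⟨i, List.mem_range.mpr (by omega), ?_⟩
    rw [Bool.and_eq_true, decide_eq_true_eq, decide_eq_true_eq]
    exact ⟨(pvCond_iff 'a' 'b' l i len hil 0).mpr hb, (pvCond_iff 'a' 'c' l i len hil 0).mpr hc⟩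

lemma pvCnt_zero (c : Char) (l : List Char) (i : Nat) : pvCnt c l i 0 = 0 := by
  simp [pvCnt]

lemma pvG_some (l : List Char) (i v : Nat) (h : pvInnerA (l.drop i) 0 0 0 0 = some v) :
    i + v ≤ l.length ∧ pvPW l i v ∧ ∀ u, u < v → ¬ pvPW l i u := by
  have hs := (pvInnerA_spec l i (l.drop i) 0 (by simp)).1 v (by
    simpa [pvCnt_zero] using h)
  obtain ⟨h1, h2, h3, h4⟩ := hs
  refine ⟨h2, h3, ?_⟩
  intro u hu hP
  rcases Nat.eq_zero_or_pos u with rfl | hpos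
  · exact absurd hP.1 (by omega)
  · exact h4 u hpos hu hP

lemma pvG_none (l : List Char) (i : Nat) (h : pvInnerA (l.drop i) 0 0 0 0 = none) :
    ∀ u, i + u ≤ l.length → ¬ pvPW l i u := by
  intro u hu hP
  rcases Nat.eq_zero_or_pos u with rfl | hpos
  · exact absurd hP.1 (by omega)
  · exact (pvInnerA_spec l i (l.drop i) 0 (by simp)).2 (by simpa [pvCnt_zero] using h) u hpos hu hP

lemma pvG_le (l : List Char) (i u : Nat) (h1 : i + u ≤ l.length) (h2 : pvPW l i u) :
    ∃ w, pvInnerA (l.drop i) 0 0 0 0 = some w ∧ w ≤ u := by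
  cases hg : pvInnerA (l.drop i) 0 0 0 0 with
  | none => exact absurd h2 (pvG_none l i hg u h1)
  | some w =>
    refine ⟨w, rfl, ?_⟩
    by_contra hlt
    exact (pvG_some l i w hg).2.2 u (by omega) h2

theorem pv_main (s : String) : smallest_dominant_substring s = smallest_dominant_substring_alt s := by
  have hfold := pvFold_spec (fun i => pvInnerA (s.toList.drop i) 0 0 0 0) (List.range s.toList.length) none
  simp only [smallest_dominant_substring, smallest_dominant_substring_alt]
  cases hA : List.foldl (fun acc i => pvOMin acc (pvInnerA (s.toList.drop i) 0 0 0 0)) none (List.range s.toList.length) with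
  | none =>
    obtain ⟨-, hall⟩ := hfold.2 hA
    cases hB : (List.range' 2 (s.toList.length - 1)).find? (fun len => pvScanB (pvDa s.toList) (pvDc s.toList) s.toList.length len) with
    | none => rfl
    | some v =>
      exfalso
      obtain ⟨hq, hv2, hvlt, -⟩ := pvFind?_range'_some _ _ _ _ hB
      obtain ⟨i, hil, hb, hc⟩ := (pvScanB_iff s.toList v).mp hq
      have hPW : pvPW s.toList i v := ⟨hv2, hb, hc⟩
      have hi_mem : i ∈ List.range s.toList.length := List.mem_range.mpr (by omega)
      exact pvG_none s.toList i (hall i hi_mem) v hil hPW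
  | some v =>
    obtain ⟨hsrc, -, hmin⟩ := hfold.1 v hA
    have hsrc' : ∃ i ∈ List.range s.toList.length, pvInnerA (s.toList.drop i) 0 0 0 0 = some v := by
      rcases hsrc with h | h
      · cases h
      · exact h
    obtain ⟨i0, hi0mem, hg0⟩ := hsrc'
    obtain ⟨hi0l, hPW0, -⟩ := pvG_some s.toList i0 v hg0
    have hq : pvScanB (pvDa s.toList) (pvDc s.toList) s.toList.length v = true :=
      (pvScanB_iff _ v).mpr ⟨i0, hi0l, hPW0.2.1, hPW0.2.2⟩
    have hv2 : 2 ≤ v := hPW0.1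
    cases hB : (List.range' 2 (s.toList.length - 1)).find? (fun len => pvScanB (pvDa s.toList) (pvDc s.toList) s.toList.length len) with
    | none =>
      exfalso
      have := pvFind?_range'_none _ _ _ hB v hv2 (by omega)
      rw [hq] at this; cases this
    | some v' =>
      obtain ⟨hq', hv'2, hv'lt, hfirst⟩ := pvFind?_range'_some _ _ _ _ hB
      obtain ⟨i', hil', hb', hc'⟩ := (pvScanB_iff s.toList v').mp hq'
      have hPW' : pvPW s.toList i' v' := ⟨hv'2, hb', hc'⟩
      obtain ⟨w, hgw, hwle⟩ := pvG_le s.toList i' v' hil' hPW'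
      have hvw : v ≤ w := hmin i' (List.mem_range.mpr (by omega)) w hgw
      have h2 : ¬ v < v' := by
        intro hlt
        have := hfirst v hv2 hlt
        rw [hq] at this; cases this
      have hvv : v = v' := by omega
      subst hvv; rfl

-- ===== VERDICT (by name: the statement is the Claim_ definition above) =====
theorem smallest_dominant_substring_spec : Claim_equal_smallest_dominant_substring := by
  intro s _
  exact pv_main s
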